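-- pv_equiv track=rewrite | github.com/Maxeemja/SP-KURSACH | KP-9-TypeScript-IO-02-Hrytsiuk/test.py | algo
-- ===== SOURCE A (Python) =====
-- def algo(a,d,n):
--     i=1
--     s=a
--     while(i!=n):
--         a=a+d
--         s=s+a
--         i=i+1
--     return a,s
-- ===== SOURCE B (Python) =====
-- def algo(a, d, n):
--     last = a + (n - 1) * d
--     total = n * (2 * a + (n - 1) * d) // 2
--     return last, total
-- ===== Notes on version B (the rewrite author's own statement) =====
-- stated objective: faster
-- what changed: replaced the O(n) accumulation loop by the closed-form arithmetic-progression formulas (last term a+(n-1)d, sum n(2a+(n-1)d)/2)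
import Mathlib
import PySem

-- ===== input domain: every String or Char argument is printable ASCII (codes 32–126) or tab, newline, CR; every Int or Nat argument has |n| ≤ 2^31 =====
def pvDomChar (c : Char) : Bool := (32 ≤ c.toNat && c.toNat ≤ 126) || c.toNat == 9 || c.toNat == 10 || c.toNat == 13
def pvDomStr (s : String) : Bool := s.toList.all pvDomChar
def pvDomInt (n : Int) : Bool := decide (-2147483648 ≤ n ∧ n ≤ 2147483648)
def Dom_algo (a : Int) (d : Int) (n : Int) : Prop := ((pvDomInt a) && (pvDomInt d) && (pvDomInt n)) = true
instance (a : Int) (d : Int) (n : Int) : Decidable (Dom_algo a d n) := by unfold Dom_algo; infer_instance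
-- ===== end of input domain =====

-- B replaces A's O(n) accumulation loop by the closed-form arithmetic-progression formulas (faster, asymptotic).


-- ===== PORT A =====
-- the while loop 'while i != n: a += d; s += a; i += 1' runs (n-1) times (Pre_ gives n ≥ 1);
-- ported as structural recursion on that count, carrying the same state (a, s)
def algoLoop (d : Int) (a : Int) (s : Int) : Nat → Int × Int
  | 0 => (a, s)
  | k + 1 => algoLoop d (a + d) (s + (a + d)) k

def algo (a : Int) (d : Int) (n : Int) : Int × Int :=
  algoLoop d a a (n - 1).toNat

-- ===== PORT B =====
def algo_alt (a : Int) (d : Int) (n : Int) : Int × Int :=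
  (a + (n - 1) * d, PySem.Int.floordiv (n * (2 * a + (n - 1) * d)) 2)

-- ===== PRECONDITION & SPEC =====
-- A's while loop never terminates when n ≤ 0 (i starts at 1 and only increases), so Pre_ requires n ≥ 1.
def Pre_algo (a : Int) (d : Int) (n : Int) : Prop := 1 ≤ n
instance (a : Int) (d : Int) (n : Int) : Decidable (Pre_algo a d n) := by unfold Pre_algo; infer_instance
def pvWitness_algo : Int × Int × Int := (3, 2, 5)

def Spec_algo (a : Int) (d : Int) (n : Int) (out : Int × Int) : Prop := out = algo_alt a d n
instance (a : Int) (d : Int) (n : Int) (out : Int × Int) : Decidable (Spec_algo a d n out) := by unfold Spec_algo; infer_instance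

-- ===== CLAIM (what is proved, stated in full; the proofs are below) =====
def Claim_equal_algo : Prop := ∀ (a : Int) (d : Int) (n : Int), Dom_algo a d n → Pre_algo a d n → Spec_algo a d n (algo a d n)

-- ===== LEMMAS AND PROOFS =====
theorem algoLoop_eq (d : Int) (k : Nat) : ∀ (a s : Int),
    algoLoop d a s k = (a + (k : Int) * d, s + (k : Int) * a + ((k * (k + 1) / 2 : Nat) : Int) * d) := by
  induction k with
  | zero => intro a s; simp [algoLoop]
  | succ k ih =>
    intro a s
    rw [algoLoop, ih]
    have hT : ((k + 1) * (k + 1 + 1) / 2 : Nat) = (k * (k + 1) / 2 : Nat) + (k + 1) := by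
      have h : (k + 1) * (k + 1 + 1) = k * (k + 1) + (k + 1) * 2 := by ring
      rw [h, Nat.add_mul_div_right _ _ (by norm_num : 0 < 2)]
    rw [Prod.mk.injEq]
    constructor
    · push_cast; ring
    · rw [hT]; push_cast; ring

theorem algo_spec : Claim_equal_algo := by
  intro a d n _ hn
  unfold Pre_algo at hn
  unfold Spec_algo algo algo_alt
  set k : Nat := (n - 1).toNat with hk
  have hkn : (k : Int) = n - 1 := by omega
  rw [algoLoop_eq]
  have h2 : ((k * (k + 1) / 2 : Nat) : Int) * 2 = (k : Int) * ((k : Int) + 1) := by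
    have hnat : (k * (k + 1) / 2) * 2 = k * (k + 1) :=
      Nat.div_mul_cancel ((Nat.even_mul_succ_self k).two_dvd)
    exact_mod_cast congrArg (Nat.cast : Nat → Int) hnat
  have hfd : PySem.Int.floordiv (n * (2 * a + (n - 1) * d)) 2
      = a + (k : Int) * a + ((k * (k + 1) / 2 : Nat) : Int) * d := by
    have hnum : n * (2 * a + (n - 1) * d)
        = (a + (k : Int) * a + ((k * (k + 1) / 2 : Nat) : Int) * d) * 2 := by
      have hn1 : n = (k : Int) + 1 := by omega
      rw [hn1]; linear_combination (-d) * h2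
    rw [hnum, PySem.Int.floordiv_eq_ediv_of_pos (by norm_num)]
    exact Int.mul_ediv_cancel _ (by norm_num)
  rw [hfd, hkn]
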